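-- pv_equiv track=rewrite | github.com/vladigt9/Sentiment-Analysis-of-Tech-New-Data-for-Stock-Prediction | sentiment_code/roberta.py | split_on_every_nth_dot
-- ===== SOURCE A (Python) =====
-- def split_on_every_nth_dot(s, n=10):
--     parts = []
--     current_part = []
--     dot_count = 0
--
--     for char in s:
--         current_part.append(char)
--         if char == '.':
--             dot_count += 1
--             if dot_count == n:
--                 parts.append(''.join(current_part))
--                 current_part = []
--                 dot_count = 0
--
--     # Add the last part if any
--     if current_part:
--         parts.append(''.join(current_part))
--
--     return parts
-- ===== SOURCE B (Python) =====
-- def split_on_every_nth_dot(s, n=10):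
--     if n > 0:
--         dots = [i for i, c in enumerate(s) if c == '.']
--         cuts = dots[n-1::n]
--     else:
--         cuts = []
--     parts = []
--     start = 0
--     for p in cuts:
--         parts.append(s[start:p + 1])
--         start = p + 1
--     if start < len(s):
--         parts.append(s[start:])
--     return parts
-- ===== Notes on version B (the rewrite author's own statement) =====
-- stated objective: alternative
-- what changed: A accumulates characters one by one with a running dot counter and flushes a buffer; B first builds a table of all dot positions in one pass, selects every n-th position as a cut point, and produces the chunks by slicing the string between consecutive cuts.
import Mathlib
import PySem

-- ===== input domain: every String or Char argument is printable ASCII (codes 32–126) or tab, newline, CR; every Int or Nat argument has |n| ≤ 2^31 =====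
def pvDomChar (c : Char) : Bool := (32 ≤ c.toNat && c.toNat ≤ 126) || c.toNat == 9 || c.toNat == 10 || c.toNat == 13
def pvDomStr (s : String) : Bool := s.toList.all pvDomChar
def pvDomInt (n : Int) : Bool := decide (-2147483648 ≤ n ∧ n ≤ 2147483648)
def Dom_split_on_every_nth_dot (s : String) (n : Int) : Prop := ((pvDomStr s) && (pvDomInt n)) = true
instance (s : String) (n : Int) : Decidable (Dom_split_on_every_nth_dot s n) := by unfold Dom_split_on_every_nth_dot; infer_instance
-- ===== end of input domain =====

-- B replaces A's char-accumulating loop by a dot-position table plus a slicing pass (objective: alternative decomposition, same cost).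

-- ===== PORT A =====
-- the for-loop over s with state (parts, current_part, dot_count); ''.join of a list of single chars is String.ofList (exact)
def pvAGo (n : Int) : List Char → List String → List Char → Int → List String
  | [], parts, cur, _ => if cur ≠ [] then parts ++ [String.ofList cur] else parts
  | c :: cs, parts, cur, d =>
    if c = '.' then
      if d + 1 = n then pvAGo n cs (parts ++ [String.ofList (cur ++ [c])]) [] 0
      else pvAGo n cs parts (cur ++ [c]) (d + 1)
    else pvAGo n cs parts (cur ++ [c]) d

def split_on_every_nth_dot (s : String) (n : Int) : List String :=
  pvAGo n s.toList [] [] 0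

-- ===== PORT B =====
-- [i for i, c in enumerate(s) if c == '.']  (the proofs use it with a general start index; Source B calls it at 0)
def pvDotsFrom (k : Int) (cs : List Char) : List Int :=
  ((PySem.List.enumerate cs k).filter (fun p => p.2 == '.')).map (fun p => p.1)

-- hand port of the extended slice dots[n-1::n]: after the initial drop of n-1, keep one element then skip g = n-1;
-- exact for start n-1 ≥ 0 and step n > 0, which the n > 0 guard in split_on_every_nth_dot_alt guarantees
def pvStepSel (g : Nat) : List Int → List Int
  | [] => []
  | x :: xs => x :: pvStepSel g (xs.drop g)
termination_by xs => xs.length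
decreasing_by simp

-- the slicing pass: for p in cuts: append s[start:p+1]; then s[start:] if non-empty
def pvBGo (cs : List Char) : List Int → Int → List String
  | [], start => if start < (cs.length : Int) then [String.ofList (PySem.List.slice cs (some start) none)] else []
  | p :: ps, start => String.ofList (PySem.List.slice cs (some start) (some (p + 1))) :: pvBGo cs ps (p + 1)

def split_on_every_nth_dot_alt (s : String) (n : Int) : List String :=
  let cs := s.toList
  let cuts := if n > 0 then pvStepSel (n.toNat - 1) ((pvDotsFrom 0 cs).drop (n.toNat - 1)) else []
  pvBGo cs cuts 0

-- ===== PRECONDITION & SPEC =====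
def Spec_split_on_every_nth_dot (s : String) (n : Int) (out : List String) : Prop := out = split_on_every_nth_dot_alt s n
instance (s : String) (n : Int) (out : List String) : Decidable (Spec_split_on_every_nth_dot s n out) := by unfold Spec_split_on_every_nth_dot; infer_instance

-- ===== CLAIM (what is proved, stated in full; the proofs are below) =====
def Claim_equal_split_on_every_nth_dot : Prop := ∀ (s : String) (n : Int), Dom_split_on_every_nth_dot s n → Spec_split_on_every_nth_dot s n (split_on_every_nth_dot s n)

-- ===== LEMMAS AND PROOFS =====

-- index of the k-th dot (1-based), reference for both sides
def pvNthDot : Nat → List Char → Option Nat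
  | _, [] => none
  | k, c :: cs =>
    if c = '.' then (if k ≤ 1 then some 0 else (pvNthDot (k-1) cs).map (· + 1))
    else (pvNthDot k cs).map (· + 1)

theorem pvNthDot_lt : ∀ {k : Nat} {cs : List Char} {i : Nat}, pvNthDot k cs = some i → i < cs.length := by
  intro k cs
  induction cs generalizing k with
  | nil => intro i h; simp [pvNthDot] at h
  | cons c cs ih =>
    intro i h
    rw [pvNthDot] at h
    split_ifs at h with hc hk
    · simp only [Option.some_inj] at h; subst h; simp
    · rw [Option.map_eq_some_iff] at h
      obtain ⟨j, hj, rfl⟩ := h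
      have := ih hj; simp; omega
    · rw [Option.map_eq_some_iff] at h
      obtain ⟨j, hj, rfl⟩ := h
      have := ih hj; simp; omega

-- reference splitter: cut after each n'-th dot
def pvR (n' : Nat) (cs : List Char) : List String :=
  match h : pvNthDot n' cs with
  | some i => String.ofList (cs.take (i+1)) :: pvR n' (cs.drop (i+1))
  | none => if cs = [] then [] else [String.ofList cs]
termination_by cs.length
decreasing_by
  have := pvNthDot_lt h
  simp
  omega

theorem pvR_some {n' : Nat} {cs : List Char} {i : Nat} (h : pvNthDot n' cs = some i) :
    pvR n' cs = String.ofList (cs.take (i+1)) :: pvR n' (cs.drop (i+1)) := by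
  rw [pvR]; split <;> simp_all

theorem pvR_none {n' : Nat} {cs : List Char} (h : pvNthDot n' cs = none) :
    pvR n' cs = if cs = [] then [] else [String.ofList cs] := by
  rw [pvR]; split <;> simp_all

theorem pvR_nil (n' : Nat) : pvR n' [] = [] := by
  rw [pvR_none (by simp [pvNthDot])]; simp

theorem pvDotsFrom_nil (k : Int) : pvDotsFrom k [] = [] := by
  simp [pvDotsFrom, PySem.List.enumerate]

theorem pvDotsFrom_cons (k : Int) (c : Char) (cs : List Char) :
    pvDotsFrom k (c :: cs) = (if c = '.' then [k] else []) ++ pvDotsFrom (k+1) cs := by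
  by_cases h : c = '.' <;> simp [pvDotsFrom, PySem.List.enumerate_cons, h]

theorem pvDotsFrom_shift : ∀ (cs : List Char) (a b : Int),
    pvDotsFrom (a + b) cs = (pvDotsFrom a cs).map (· + b) := by
  intro cs
  induction cs with
  | nil => intro a b; simp [pvDotsFrom_nil]
  | cons c cs ih =>
    intro a b
    rw [pvDotsFrom_cons, pvDotsFrom_cons]
    have : a + b + 1 = (a + 1) + b := by ring
    rw [this, ih (a+1) b]
    by_cases h : c = '.' <;> simp [h]

theorem pvDotsFrom_nonneg : ∀ (cs : List Char) (k : Int), 0 ≤ k →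
    ∀ q ∈ pvDotsFrom k cs, 0 ≤ q := by
  intro cs
  induction cs with
  | nil => intro k hk q hq; simp [pvDotsFrom_nil] at hq
  | cons c cs ih =>
    intro k hk q hq
    rw [pvDotsFrom_cons] at hq
    simp only [List.mem_append] at hq
    rcases hq with hq | hq
    · by_cases h : c = '.' <;> simp [h] at hq; omega
    · exact ih (k+1) (by omega) q hq

theorem pvStepSel_map (g : Nat) (f : Int → Int) : ∀ (L : List Int),
    pvStepSel g (L.map f) = (pvStepSel g L).map f := by
  intro L
  induction L using pvStepSel.induct g with
  | case1 => simp [pvStepSel]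
  | case2 x xs ih => rw [List.map_cons, pvStepSel, pvStepSel, ← List.map_drop, ih, List.map_cons]

theorem pvStepSel_subset (g : Nat) : ∀ (L : List Int), ∀ q ∈ pvStepSel g L, q ∈ L := by
  intro L
  induction L using pvStepSel.induct g with
  | case1 => intro q hq; rw [pvStepSel] at hq; exact hq
  | case2 x xs ih =>
    intro q hq
    rw [pvStepSel] at hq
    rcases List.mem_cons.mp hq with h | h
    · simp [h]
    · exact List.mem_cons_of_mem x (List.mem_of_mem_drop (ih q h))

theorem pvStepSel_nil (g : Nat) : pvStepSel g [] = [] := by rw [pvStepSel]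

theorem pvStepSel_cons (g : Nat) (x : Int) (xs : List Int) :
    pvStepSel g (x :: xs) = x :: pvStepSel g (xs.drop g) := by rw [pvStepSel]

-- the n'-th dot splits the dot table
theorem pvDots_split : ∀ (cs : List Char) (k i : Nat) (a : Int), 1 ≤ k →
    pvNthDot k cs = some i →
    ∃ D1 : List Int, pvDotsFrom a cs = D1 ++ (a + i) :: pvDotsFrom (a + i + 1) (cs.drop (i+1))
      ∧ D1.length = k - 1 := by
  intro cs
  induction cs with
  | nil => intro k i a hk h; simp [pvNthDot] at h
  | cons c cs ih =>
    intro k i a hk h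
    rw [pvNthDot] at h
    split_ifs at h with hc hk1
    · -- c = '.', k = 1, i = 0
      simp only [Option.some_inj] at h; subst h
      refine ⟨[], ?_, by simp; omega⟩
      rw [pvDotsFrom_cons]
      simp [hc]
    · -- c = '.', k ≥ 2
      rw [Option.map_eq_some_iff] at h
      obtain ⟨j, hj, rfl⟩ := h
      obtain ⟨D1, hD, hlen⟩ := ih (k-1) j (a+1) (by omega) hj
      refine ⟨a :: D1, ?_, by simp [hlen]; omega⟩
      rw [pvDotsFrom_cons, if_pos hc, hD]
      push_cast
      simp
      constructor
      · ring
      · congr 1; ring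
    · -- c ≠ '.'
      rw [Option.map_eq_some_iff] at h
      obtain ⟨j, hj, rfl⟩ := h
      obtain ⟨D1, hD, hlen⟩ := ih k j (a+1) hk hj
      refine ⟨D1, ?_, hlen⟩
      rw [pvDotsFrom_cons, if_neg hc, hD]
      push_cast
      simp
      constructor
      · ring
      · congr 1; ring

theorem pvDots_short : ∀ (cs : List Char) (k : Nat) (a : Int), 1 ≤ k →
    pvNthDot k cs = none → (pvDotsFrom a cs).length < k := by
  intro cs
  induction cs with
  | nil => intro k a hk h; rw [pvDotsFrom_nil]; simpa using hk
  | cons c cs ih =>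
    intro k a hk h
    rw [pvNthDot] at h
    rw [pvDotsFrom_cons]
    split_ifs at h with hc hk1
    -- the (c = '.', k ≤ 1) branch is closed by split_ifs: some 0 = none is absurd
    · rw [Option.map_eq_none_iff] at h
      have := ih (k-1) (a+1) (by omega) h
      simp [hc]; omega
    · rw [Option.map_eq_none_iff] at h
      have := ih k (a+1) hk h
      simp [hc]; omega

theorem pvBGo_shift : ∀ (ps : List Int) (k : Nat) (st : Int) (cs : List Char), 0 ≤ st →
    (∀ q ∈ ps, 0 ≤ q) →
    pvBGo cs (ps.map (· + (k : Int))) (st + k) = pvBGo (cs.drop k) ps st := by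
  intro ps
  induction ps with
  | nil =>
    intro k st cs hst _
    simp only [List.map_nil, pvBGo]
    have hcond : (st + k < (cs.length : Int)) ↔ (st < ((cs.drop k).length : Int)) := by
      rw [List.length_drop]; omega
    by_cases hlt : st + k < (cs.length : Int)
    · rw [if_pos hlt, if_pos (hcond.mp hlt)]
      rw [PySem.List.slice_from cs (by omega), PySem.List.slice_from (cs.drop k) hst]
      rw [List.drop_drop]
      have e : (st + (k:Int)).toNat = k + st.toNat := by omega
      rw [e]
    · rw [if_neg hlt, if_neg (fun hh => hlt (hcond.mpr hh))]
  | cons p ps ih =>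
    intro k st cs hst hps
    have hp : 0 ≤ p := hps p (by simp)
    simp only [List.map_cons, pvBGo]
    congr 1
    · congr 1
      rw [PySem.List.slice_toNat cs (by omega) (by omega),
          PySem.List.slice_toNat (cs.drop k) hst (by omega), List.drop_drop]
      congr 1
      · omega
      · congr 1
        omega
    · have e3 : p + (k:Int) + 1 = (p + 1) + (k:Int) := by ring
      rw [e3, ih k (p+1) cs (by omega) (fun q hq => hps q (by simp [hq]))]

-- A's loop computes pvR
theorem pvAGo_eq : ∀ (n : Int), 1 ≤ n → ∀ (cs : List Char) (parts : List String) (cur : List Char) (d : Int),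
    0 ≤ d → d < n →
    pvAGo n cs parts cur d = parts ++ (match pvNthDot (n - d).toNat cs with
      | some i => String.ofList (cur ++ cs.take (i+1)) :: pvR n.toNat (cs.drop (i+1))
      | none => if cur ++ cs = [] then [] else [String.ofList (cur ++ cs)]) := by
  intro n hn cs
  induction cs with
  | nil =>
    intro parts cur d h0 hd
    simp only [pvAGo, pvNthDot]
    by_cases hc : cur = [] <;> simp [hc]
  | cons c cs ih =>
    intro parts cur d h0 hd
    by_cases hc : c = '.'
    · by_cases hdn : d + 1 = n
      · have hk : (n - d).toNat = 1 := by omega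
        have hstep : pvNthDot ((n - d).toNat) (c :: cs) = some 0 := by
          rw [hk, pvNthDot, if_pos hc, if_pos (by omega)]
        simp only [pvAGo, if_pos hc, if_pos hdn, hstep]
        rw [ih (parts ++ [String.ofList (cur ++ [c])]) [] 0 (by omega) (by omega)]
        have hn0 : (n - 0).toNat = n.toNat := by omega
        rw [hn0]
        cases h2 : pvNthDot n.toNat cs with
        | some i => simp [pvR_some h2]
        | none => by_cases hcs : cs = [] <;> simp [pvR_none h2, hcs, pvR_nil]
      · have hk2 : 2 ≤ (n - d).toNat := by omega
        have hk1 : (n - (d+1)).toNat = (n - d).toNat - 1 := by omega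
        simp only [pvAGo, if_pos hc, if_neg hdn]
        rw [ih parts (cur ++ [c]) (d+1) (by omega) (by omega), hk1]
        have hstep : pvNthDot ((n - d).toNat) (c :: cs)
            = (pvNthDot ((n - d).toNat - 1) cs).map (· + 1) := by
          rw [pvNthDot, if_pos hc, if_neg (by omega)]
        rw [hstep]
        cases h2 : pvNthDot ((n - d).toNat - 1) cs with
        | some i => simp [List.take_succ_cons]
        | none => by_cases hcur : cur = [] <;> simp [hcur]
    · simp only [pvAGo, if_neg hc]
      rw [ih parts (cur ++ [c]) d h0 hd]
      have hk1 : 1 ≤ (n - d).toNat := by omega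
      have hstep : pvNthDot ((n - d).toNat) (c :: cs)
          = (pvNthDot ((n - d).toNat) cs).map (· + 1) := by
        rw [pvNthDot, if_neg hc]
      rw [hstep]
      cases h2 : pvNthDot ((n - d).toNat) cs with
      | some i => simp [List.take_succ_cons]
      | none => by_cases hcur : cur = [] <;> simp [hcur]

-- B's pipeline computes pvR
theorem pvB_eq : ∀ (n : Int), 1 ≤ n → ∀ (cs : List Char),
    pvBGo cs (pvStepSel (n.toNat - 1) ((pvDotsFrom 0 cs).drop (n.toNat - 1))) 0 = pvR n.toNat cs := by
  intro n hn
  have H : ∀ (m : Nat) (cs : List Char), cs.length = m →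
      pvBGo cs (pvStepSel (n.toNat - 1) ((pvDotsFrom 0 cs).drop (n.toNat - 1))) 0 = pvR n.toNat cs := by
    intro m
    induction m using Nat.strong_induction_on with
    | _ m ih =>
      intro cs hm
      cases h2 : pvNthDot n.toNat cs with
      | some i =>
        obtain ⟨D1, hD, hlen⟩ := pvDots_split cs n.toNat i 0 (by omega) h2
        rw [hD]
        have hdl : (D1 ++ ((0:Int) + i) :: pvDotsFrom ((0:Int) + i + 1) (cs.drop (i+1))).drop (n.toNat - 1)
            = ((0:Int) + i) :: pvDotsFrom ((0:Int) + i + 1) (cs.drop (i+1)) := by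
          rw [← hlen, List.drop_left]
        rw [hdl, pvStepSel_cons]
        have hshift : pvDotsFrom ((0:Int) + i + 1) (cs.drop (i+1))
            = (pvDotsFrom 0 (cs.drop (i+1))).map (· + (((i+1 : Nat)) : Int)) := by
          have h := pvDotsFrom_shift (cs.drop (i+1)) 0 (((i+1 : Nat)) : Int)
          have e : (0:Int) + i + 1 = 0 + (((i+1 : Nat)) : Int) := by push_cast; ring
          rw [e, h]
        rw [hshift, ← List.map_drop, pvStepSel_map]
        simp only [pvBGo]
        have e2 : (0:Int) + ↑i + 1 = (0:Int) + (((i+1 : Nat)) : Int) := by push_cast; ring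
        rw [e2, pvBGo_shift _ (i+1) 0 cs (le_refl 0) (fun q hq =>
          pvDotsFrom_nonneg (cs.drop (i+1)) 0 (le_refl 0) q
            (List.mem_of_mem_drop (pvStepSel_subset _ _ q hq)))]
        have hi : i < cs.length := pvNthDot_lt h2
        rw [ih ((cs.drop (i+1)).length) (by simp; omega) (cs.drop (i+1)) rfl]
        rw [pvR_some h2]
        congr 1
        congr 1
        rw [PySem.List.slice_toNat cs (by omega) (by omega)]
        simp
      | none =>
        have hlt := pvDots_short cs n.toNat 0 (by omega) h2
        have hdrop : (pvDotsFrom 0 cs).drop (n.toNat - 1) = [] := by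
          apply List.drop_eq_nil_of_le
          omega
        rw [hdrop, pvStepSel_nil]
        simp only [pvBGo]
        rw [pvR_none h2]
        rw [PySem.List.slice_from cs (le_refl 0)]
        cases cs <;> simp
  intro cs
  exact H cs.length cs rfl

-- n ≤ 0: A never flushes
theorem pvAGo_nonpos : ∀ (n : Int), n ≤ 0 → ∀ (cs : List Char) (parts : List String) (cur : List Char) (d : Int),
    0 ≤ d → pvAGo n cs parts cur d = parts ++ (if cur ++ cs = [] then [] else [String.ofList (cur ++ cs)]) := by
  intro n hn cs
  induction cs with
  | nil =>
    intro parts cur d h0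
    simp only [pvAGo]
    by_cases hc : cur = [] <;> simp [hc]
  | cons c cs ih =>
    intro parts cur d h0
    by_cases hc : c = '.'
    · have hdn : ¬ (d + 1 = n) := by omega
      simp only [pvAGo, if_pos hc, if_neg hdn]
      rw [ih parts (cur ++ [c]) (d+1) (by omega)]
      simp
    · simp only [pvAGo, if_neg hc]
      rw [ih parts (cur ++ [c]) d h0]
      simp

-- ===== VERDICT (by name: the statement is the Claim_ definition above) =====
theorem split_on_every_nth_dot_spec : Claim_equal_split_on_every_nth_dot := by
  intro s n _
  unfold Spec_split_on_every_nth_dot split_on_every_nth_dot split_on_every_nth_dot_alt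
  by_cases hn : 1 ≤ n
  · simp only [if_pos (by omega : n > 0)]
    rw [pvAGo_eq n hn s.toList [] [] 0 (le_refl 0) (by omega)]
    rw [pvB_eq n hn s.toList]
    have e : (n - 0).toNat = n.toNat := by omega
    rw [e]
    cases h2 : pvNthDot n.toNat s.toList with
    | some i => rw [pvR_some h2]; simp
    | none => rw [pvR_none h2]; by_cases h : s.toList = [] <;> simp [h]
  · simp only [if_neg (by omega : ¬ n > 0)]
    rw [pvAGo_nonpos n (by omega) s.toList [] [] 0 (le_refl 0)]
    simp only [pvBGo]
    rw [PySem.List.slice_from s.toList (le_refl 0)]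
    cases hcs : s.toList <;> simp
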